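-- pv_equiv track=rewrite | github.com/MrBrantCode/unitest_baseline | mut_generate/mist_train_cf/cf_6493/solution.py | get_unique_elements
-- ===== SOURCE A (Python) =====
-- def get_unique_elements(nums):
--     unique_elements = []
--     for i in range(len(nums)):
--         is_unique = True
--         for j in range(i + 1, len(nums)):
--             if nums[i] == nums[j]:
--                 is_unique = False
--                 break
--         if is_unique:
--             unique_elements.append(nums[i])
--     return unique_elements
-- ===== SOURCE B (Python) =====
-- def get_unique_elements(nums):
--     # Single reverse pass keeping the first occurrence of each value
--     # (= last occurrence in original order), then restore original order.
--     seen = set()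
--     out = []
--     for x in reversed(nums):
--         if x not in seen:
--             seen.add(x)
--             out.append(x)
--     out.reverse()
--     return out
-- ===== Notes on version B (the rewrite author's own statement) =====
-- stated objective: faster
-- what changed: Replaced the quadratic nested index scan (for each i, rescan the suffix for a later equal value) by a single reverse pass that keeps the first occurrence of each value in a hash set and reverses the result.
import Mathlib
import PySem

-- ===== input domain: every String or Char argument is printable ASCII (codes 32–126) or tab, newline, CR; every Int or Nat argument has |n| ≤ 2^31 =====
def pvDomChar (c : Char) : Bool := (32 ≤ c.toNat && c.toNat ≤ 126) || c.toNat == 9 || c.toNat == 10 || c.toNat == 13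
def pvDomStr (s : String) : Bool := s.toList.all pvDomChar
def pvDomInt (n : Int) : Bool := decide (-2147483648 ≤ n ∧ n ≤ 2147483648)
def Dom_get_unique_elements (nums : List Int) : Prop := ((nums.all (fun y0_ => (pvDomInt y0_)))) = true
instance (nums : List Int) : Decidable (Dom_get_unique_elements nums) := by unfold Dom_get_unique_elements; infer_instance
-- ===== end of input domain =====

-- B replaces A's quadratic nested suffix rescan by a single reverse pass over the list
-- keeping first occurrences in a set, then reversing (objective: faster, O(n^2) → O(n)).

-- ===== PORT A =====
-- inner 'for j in range(i+1, len(nums))' loop with its break: returns is_unique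
def pvAInner (nums : List Int) (xi : Int) : List Int → Bool
  | [] => true
  | j :: rest =>
      if xi == (PySem.List.pyGet? nums j).getD 0 then false
      else pvAInner nums xi rest

def get_unique_elements (nums : List Int) : List Int :=
  (PySem.List.pyRange 0 (nums.length : Int) 1).foldl
    (fun unique_elements i =>
      let is_unique :=
        pvAInner nums ((PySem.List.pyGet? nums i).getD 0)
          (PySem.List.pyRange (i + 1) (nums.length : Int) 1)
      if is_unique then unique_elements ++ [(PySem.List.pyGet? nums i).getD 0]
      else unique_elements) []

-- ===== PORT B =====
def get_unique_elements_alt (nums : List Int) : List Int :=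
  let p :=
    nums.reverse.foldl
      (fun (p : PySem.Set Int × List Int) x =>
        if PySem.Set.contains p.1 x then p
        else (PySem.Set.add p.1 x, p.2 ++ [x]))
      (PySem.Set.empty, [])
  p.2.reverse

-- ===== PRECONDITION & SPEC =====
def Spec_get_unique_elements (nums : List Int) (out : List Int) : Prop := out = get_unique_elements_alt nums
instance (nums : List Int) (out : List Int) : Decidable (Spec_get_unique_elements nums out) := by unfold Spec_get_unique_elements; infer_instance

-- ===== CLAIM (what is proved, stated in full; the proofs are below) =====
def Claim_equal_get_unique_elements : Prop := ∀ (nums : List Int), Dom_get_unique_elements nums → Spec_get_unique_elements nums (get_unique_elements nums)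

-- ===== LEMMAS AND PROOFS =====

-- reference: keep x iff it does not occur later
def pvKeepLast : List Int → List Int
  | [] => []
  | x :: xs => if x ∈ xs then pvKeepLast xs else x :: pvKeepLast xs

-- the inner loop decides "nums[i] not in nums[j:]"
theorem pvAInner_eq (nums : List Int) (xi : Int) (j : Nat) (hj : j ≤ nums.length) :
    pvAInner nums xi (PySem.List.pyRange (j : Int) (nums.length : Int) 1)
      = !decide (xi ∈ nums.drop j) := by
  induction hn : nums.length - j generalizing j with
  | zero =>
      have hje : j = nums.length := by omega
      subst hje
      rw [PySem.List.pyRange_one_eq_nil (by omega)]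
      simp [pvAInner]
  | succ n ih =>
      have hjl : j < nums.length := by omega
      rw [PySem.List.pyRange_one_cons (by exact_mod_cast hjl)]
      have hdrop : nums.drop j = nums[j] :: nums.drop (j + 1) :=
        (List.getElem_cons_drop hjl).symm
      have hmem : xi ∈ nums.drop j ↔ xi = nums[j] ∨ xi ∈ nums.drop (j + 1) := by
        rw [hdrop]; exact List.mem_cons
      have hget : (PySem.List.pyGet? nums (j : Int)).getD 0 = nums[j] := by
        simp [PySem.List.pyGet?_natCast, List.getElem?_eq_getElem hjl]
      simp only [pvAInner, hget]
      by_cases hx : xi = nums[j]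
      · rw [if_pos (by simp [hx])]
        have hin : xi ∈ nums.drop j := hmem.mpr (Or.inl hx)
        simp [hin]
      · rw [if_neg (by simp [hx])]
        have hcast : (j : Int) + 1 = ((j + 1 : Nat) : Int) := by push_cast; ring
        rw [hcast, ih (j + 1) (by omega) (by omega)]
        have hiff : xi ∈ nums.drop j ↔ xi ∈ nums.drop (j + 1) := by
          rw [hmem]; simp [hx]
        simp only [hiff]

-- the outer loop from index k onward builds pvKeepLast of the suffix
theorem pvALoop_eq (nums : List Int) (k : Nat) (hk : k ≤ nums.length) (acc : List Int) :
    (PySem.List.pyRange (k : Int) (nums.length : Int) 1).foldl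
      (fun unique_elements i =>
        let is_unique :=
          pvAInner nums ((PySem.List.pyGet? nums i).getD 0)
            (PySem.List.pyRange (i + 1) (nums.length : Int) 1)
        if is_unique then unique_elements ++ [(PySem.List.pyGet? nums i).getD 0]
        else unique_elements) acc
      = acc ++ pvKeepLast (nums.drop k) := by
  induction hn : nums.length - k generalizing k acc with
  | zero =>
      have hke : k = nums.length := by omega
      subst hke
      rw [PySem.List.pyRange_one_eq_nil (by omega)]
      simp [pvKeepLast]
  | succ n ih =>
      have hkl : k < nums.length := by omega
      rw [PySem.List.pyRange_one_cons (by exact_mod_cast hkl)]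
      have hget : (PySem.List.pyGet? nums (k : Int)).getD 0 = nums[k] := by
        simp [PySem.List.pyGet?_natCast, List.getElem?_eq_getElem hkl]
      have hcast : (k : Int) + 1 = ((k + 1 : Nat) : Int) := by push_cast; ring
      have hdrop : nums.drop k = nums[k] :: nums.drop (k + 1) :=
        (List.getElem_cons_drop hkl).symm
      have hKL : pvKeepLast (nums.drop k)
          = if nums[k] ∈ nums.drop (k + 1) then pvKeepLast (nums.drop (k + 1))
            else nums[k] :: pvKeepLast (nums.drop (k + 1)) := by
        rw [hdrop]; simp only [pvKeepLast]
      rw [List.foldl_cons]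
      simp only [hget, hcast, pvAInner_eq nums nums[k] (k + 1) (by omega)]
      by_cases hx : nums[k] ∈ nums.drop (k + 1)
      · rw [if_neg (by simp [hx]), ih (k + 1) (by omega) acc (by omega), hKL, if_pos hx]
      · rw [if_pos (by simp [hx]), ih (k + 1) (by omega) _ (by omega), hKL, if_neg hx]
        simp

theorem pvA_eq_keepLast (nums : List Int) : get_unique_elements nums = pvKeepLast nums := by
  have h := pvALoop_eq nums 0 (by omega) []
  simpa [get_unique_elements] using h

-- B's fold over the reversed list, as a foldr over nums
def pvBStep (x : Int) (p : PySem.Set Int × List Int) : PySem.Set Int × List Int :=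
  if PySem.Set.contains p.1 x then p else (PySem.Set.add p.1 x, p.2 ++ [x])

def pvB (nums : List Int) : PySem.Set Int × List Int :=
  nums.foldr pvBStep (PySem.Set.empty, [])

-- the seen-set after processing xs contains exactly the values of xs
theorem pvB_fst_mem (xs : List Int) (x : Int) : x ∈ (pvB xs).1 ↔ x ∈ xs := by
  induction xs generalizing x with
  | nil => simp [pvB, PySem.Set.empty]
  | cons y xs ih =>
      rw [pvB, List.foldr_cons, ← pvB, pvBStep]
      by_cases hy : PySem.Set.contains (pvB xs).1 y
      · have hymem : y ∈ xs := (ih y).mp (by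
          simpa only [PySem.Set.contains, List.contains_eq_mem, decide_eq_true_eq] using hy)
        rw [if_pos hy]
        simp only [ih x, List.mem_cons]
        exact ⟨Or.inr, fun h => h.elim (fun hxy => hxy ▸ hymem) id⟩
      · rw [if_neg hy]
        simp only [PySem.Set.add]
        rw [if_neg hy]
        simp only [List.mem_append, ih x, List.mem_cons]
        tauto

theorem pvB_snd_reverse (xs : List Int) : (pvB xs).2.reverse = pvKeepLast xs := by
  induction xs with
  | nil => simp [pvB, pvKeepLast]
  | cons y xs ih =>
      rw [pvB, List.foldr_cons, ← pvB, pvBStep]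
      by_cases hy : y ∈ xs
      · rw [if_pos (by
          simp only [PySem.Set.contains, List.contains_eq_mem, decide_eq_true_eq]
          exact (pvB_fst_mem xs y).mpr hy)]
        simp [pvKeepLast, hy, ih]
      · rw [if_neg (by
          simp only [PySem.Set.contains, List.contains_eq_mem, decide_eq_true_eq]
          exact fun h => hy ((pvB_fst_mem xs y).mp h))]
        simp [pvKeepLast, hy, ih]

theorem pvB_eq_keepLast (nums : List Int) : get_unique_elements_alt nums = pvKeepLast nums := by
  rw [get_unique_elements_alt]
  simp only [List.foldl_reverse]
  have : (nums.foldr (fun x p => (fun (p : PySem.Set Int × List Int) x =>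
      if PySem.Set.contains p.1 x then p
      else (PySem.Set.add p.1 x, p.2 ++ [x])) p x) (PySem.Set.empty, [])) = pvB nums := by
    rfl
  rw [this, pvB_snd_reverse]

-- ===== VERDICT (by name: the statement is the Claim_ definition above) =====
theorem get_unique_elements_spec : Claim_equal_get_unique_elements := by
  intro nums _
  unfold Spec_get_unique_elements
  rw [pvA_eq_keepLast, pvB_eq_keepLast]
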